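-- pv_equiv track=rewrite | github.com/bstac/Experiments | busDriverSchedule2.py | genDayByDay
-- ===== SOURCE A (Python) =====
-- def genDayByDay(days,off):
--     l = []
--     for st in off:
--         temp = []
--         for x in days:
--             boo = True
--             for ch in st:
--                 if ch in x:
--                     boo = False
--                     break
--             if(boo):
--                 temp.append(x)
--         l.append(temp)
--     return l
-- ===== SOURCE B (Python) =====
-- def genDayByDay(days, off):
--     # Inverted index: each character -> set of indices of days containing it.
--     index = {}
--     for i, x in enumerate(days):
--         for ch in x:
--             if ch not in index:
--                 index[ch] = set()
--             index[ch].add(i)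
--     res = []
--     for st in off:
--         forbidden = set()
--         for ch in st:
--             if ch in index:
--                 forbidden |= index[ch]
--         res.append([days[i] for i in range(len(days)) if i not in forbidden])
--     return res
-- ===== Notes on version B (the rewrite author's own statement) =====
-- stated objective: alternative
-- what changed: Replaces the triple nested scan (per off-set, per day, per char with break) by a one-pass inverted index from character to the set of day indices containing it; each off-set then unions the index sets of its characters into a forbidden set and keeps the days whose index is not forbidden.
import Mathlib
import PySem

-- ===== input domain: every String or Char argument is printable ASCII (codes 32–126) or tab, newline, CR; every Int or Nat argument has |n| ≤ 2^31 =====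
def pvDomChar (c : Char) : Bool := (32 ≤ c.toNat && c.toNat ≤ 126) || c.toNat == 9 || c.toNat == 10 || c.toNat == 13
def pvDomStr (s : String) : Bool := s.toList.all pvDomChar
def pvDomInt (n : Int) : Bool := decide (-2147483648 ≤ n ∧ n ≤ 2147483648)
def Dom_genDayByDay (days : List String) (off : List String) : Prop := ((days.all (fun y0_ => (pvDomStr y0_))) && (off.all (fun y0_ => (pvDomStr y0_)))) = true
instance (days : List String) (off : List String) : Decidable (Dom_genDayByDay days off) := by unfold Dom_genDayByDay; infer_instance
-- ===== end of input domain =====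

-- B replaces A's triple nested scan by a one-pass inverted index (char -> set of day
-- indices) queried per off-set (objective: alternative algorithm, similar cost).

-- ===== PORT A =====
-- 'for ch in st: if ch in x: boo=False; break' — a char-by-char loop with break;
-- 'ch in x' with ch a single character is exactly char membership in x.
def pvBooLoop (st : List Char) (x : String) : Bool :=
  match st with
  | [] => true
  | ch :: rest => if x.toList.contains ch then false else pvBooLoop rest x

def genDayByDay (days : List String) (off : List String) : List (List String) :=
  off.foldl (fun l st =>
    l ++ [days.foldl (fun temp x =>
      if pvBooLoop st.toList x then temp ++ [x] else temp) []]) []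

-- ===== PORT B =====
-- index: {} mutated by 'index[ch] = set()' / 'index[ch].add(i)'
def pvIndex (days : List String) : PySem.Dict Char (PySem.Set Int) :=
  (PySem.List.enumerate days).foldl (fun d p =>
    p.2.toList.foldl (fun d ch =>
      d.insert ch (PySem.Set.add (d.getD ch PySem.Set.empty) p.1)) d)
    PySem.Dict.empty

def genDayByDay_alt (days : List String) (off : List String) : List (List String) :=
  let index := pvIndex days
  off.foldl (fun res st =>
    let forbidden := st.toList.foldl (fun s ch =>
      match index.get? ch with
      | some t => PySem.Set.union s t
      | none => s) PySem.Set.empty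
    res ++ [((PySem.List.pyRange 0 (days.length : Int) 1).filter
              (fun i => !(PySem.Set.contains forbidden i))).map
              (fun i => PySem.List.pyGetD days i "")]) []

-- ===== PRECONDITION & SPEC =====
def Spec_genDayByDay (days : List String) (off : List String) (out : List (List String)) : Prop := out = genDayByDay_alt days off
instance (days : List String) (off : List String) (out : List (List String)) : Decidable (Spec_genDayByDay days off out) := by unfold Spec_genDayByDay; infer_instance

-- ===== CLAIM (what is proved, stated in full; the proofs are below) =====
def Claim_equal_genDayByDay : Prop := ∀ (days : List String) (off : List String), Dom_genDayByDay days off → Spec_genDayByDay days off (genDayByDay days off)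

-- ===== LEMMAS AND PROOFS =====

-- inner index-building loop over one day's characters
theorem pvMem_inner (x : List Char) (j : Int) (d : PySem.Dict Char (PySem.Set Int))
    (ch : Char) (i : Int) :
    i ∈ (x.foldl (fun d ch =>
        d.insert ch (PySem.Set.add (d.getD ch PySem.Set.empty) j)) d).getD ch PySem.Set.empty
      ↔ i ∈ d.getD ch PySem.Set.empty ∨ (i = j ∧ ch ∈ x) := by
  induction x generalizing d with
  | nil => simp
  | cons c rest ih =>
    simp only [List.foldl_cons, ih, PySem.Dict.getD_insert]
    by_cases h : ch = c
    · subst h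
      simp only [if_true, PySem.Set.mem_add, List.mem_cons]
      tauto
    · simp only [if_neg h, List.mem_cons]
      constructor
      · rintro (hm | ⟨hi, hc⟩)
        · exact Or.inl hm
        · exact Or.inr ⟨hi, Or.inr hc⟩
      · rintro (hm | ⟨hi, rfl | hc⟩)
        · exact Or.inl hm
        · exact absurd rfl h
        · exact Or.inr ⟨hi, hc⟩

-- the full inverted index: i indexes a day containing ch
theorem pvMem_index (ps : List (Int × String)) (d : PySem.Dict Char (PySem.Set Int))
    (ch : Char) (i : Int) :
    i ∈ (ps.foldl (fun d p =>
        p.2.toList.foldl (fun d ch =>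
          d.insert ch (PySem.Set.add (d.getD ch PySem.Set.empty) p.1)) d) d).getD ch PySem.Set.empty
      ↔ i ∈ d.getD ch PySem.Set.empty ∨ ∃ p ∈ ps, i = p.1 ∧ ch ∈ p.2.toList := by
  induction ps generalizing d with
  | nil => simp
  | cons p rest ih =>
    simp only [List.foldl_cons, ih, pvMem_inner, List.mem_cons]
    constructor
    · rintro (⟨h | h⟩ | ⟨q, hq, h⟩)
      · exact Or.inl h
      · exact Or.inr ⟨p, Or.inl rfl, h⟩
      · exact Or.inr ⟨q, Or.inr hq, h⟩
    · rintro (h | ⟨q, rfl | hq, h⟩)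
      · exact Or.inl (Or.inl h)
      · exact Or.inl (Or.inr h)
      · exact Or.inr ⟨q, hq, h⟩

theorem pvMem_pvIndex (days : List String) (ch : Char) (i : Int) :
    i ∈ (pvIndex days).getD ch PySem.Set.empty
      ↔ ∃ (k : Nat) (_ : k < days.length), i = (k : Int) ∧ ch ∈ (days[k]?.getD "").toList := by
  unfold pvIndex
  rw [pvMem_index]
  simp only [PySem.Dict.getD_empty]
  constructor
  · rintro (h | ⟨p, hp, h1, h2⟩)
    · simp [PySem.Set.empty] at h
    · obtain ⟨k, hk, rfl⟩ := (PySem.List.mem_enumerate_iff days 0 p).mp hp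
      exact ⟨k, hk, by simpa using h1, by simpa [List.getElem?_eq_getElem hk] using h2⟩
  · rintro ⟨k, hk, rfl, h⟩
    refine Or.inr ⟨((k : Int), days[k]), ?_, by simp, by simpa [List.getElem?_eq_getElem hk] using h⟩
    exact (PySem.List.mem_enumerate_iff days 0 _).mpr ⟨k, hk, by simp⟩

-- connect get? and getD for the Set-valued index
theorem pvGetD_some (index : PySem.Dict Char (PySem.Set Int)) (ch : Char) (i : Int) :
    (∃ t, index.get? ch = some t ∧ i ∈ t) ↔ i ∈ index.getD ch PySem.Set.empty := by
  rw [PySem.Dict.getD_eq_get?_getD]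
  cases h : index.get? ch <;> simp [PySem.Set.empty]

-- the forbidden union: i forbidden for st ↔ some char of st indexes i
theorem pvMem_forbidden (index : PySem.Dict Char (PySem.Set Int)) (st : List Char)
    (s : PySem.Set Int) (i : Int) :
    i ∈ st.foldl (fun s ch =>
        match index.get? ch with
        | some t => PySem.Set.union s t
        | none => s) s
      ↔ i ∈ s ∨ ∃ ch ∈ st, ∃ t, index.get? ch = some t ∧ i ∈ t := by
  induction st generalizing s with
  | nil => simp
  | cons c rest ih =>
    simp only [List.foldl_cons, ih, List.mem_cons]
    cases h : index.get? c with
    | none =>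
      constructor
      · rintro (hs | ⟨ch, hch, w⟩)
        · exact Or.inl hs
        · exact Or.inr ⟨ch, Or.inr hch, w⟩
      · rintro (hs | ⟨ch, rfl | hch, t, hg, hm⟩)
        · exact Or.inl hs
        · rw [h] at hg; cases hg
        · exact Or.inr ⟨ch, hch, t, hg, hm⟩
    | some t =>
      simp only [PySem.Set.mem_union]
      constructor
      · rintro ((hs | ht) | ⟨ch, hch, u, hg, hm⟩)
        · exact Or.inl hs
        · exact Or.inr ⟨c, Or.inl rfl, t, h, ht⟩
        · exact Or.inr ⟨ch, Or.inr hch, u, hg, hm⟩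
      · rintro (hs | ⟨ch, rfl | hch, u, hg, hm⟩)
        · exact Or.inl (Or.inl hs)
        · rw [h] at hg; cases hg; exact Or.inl (Or.inr hm)
        · exact Or.inr ⟨ch, hch, u, hg, hm⟩

theorem pvBooLoop_eq (st : List Char) (x : String) :
    pvBooLoop st x = !st.any (fun ch => x.toList.contains ch) := by
  induction st with
  | nil => rfl
  | cons c rest ih =>
    by_cases h : x.toList.contains c <;>
      simp only [pvBooLoop, if_pos, if_neg, h, ih, List.any_cons, Bool.not_or] <;> simp_all

-- comprehension over indices = filter of the list, when the test reads only the element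
theorem pvFilter_range (l : List α) (d : α) (p : α → Bool) :
    ((List.range l.length).filter (fun j => p (l.getD j d))).map (fun j => l.getD j d)
      = l.filter p := by
  induction l with
  | nil => simp
  | cons x rest ih =>
    rw [List.length_cons, List.range_succ_eq_map]
    simp only [List.getD] at ih
    by_cases h : p x <;>
      simp [List.filter_map, List.map_map, Function.comp_def, h, ih, List.getD]

theorem genDayByDay_eq (days : List String) (off : List String) :
    genDayByDay days off = genDayByDay_alt days off := by
  unfold genDayByDay genDayByDay_alt
  apply PySem.List.foldl_congr_mem
  intro acc st _
  congr 1
  congr 1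
  rw [PySem.List.foldl_append_if_eq_filter, List.nil_append]
  rw [PySem.List.pyRange_zero_natCast]
  rw [List.filter_map, List.map_map]
  have hpg : ∀ j : Nat, PySem.List.pyGetD days (j : Int) "" = days.getD j "" := by
    intro j; simp [PySem.List.pyGetD_natCast, List.getD]
  rw [show ((fun i => PySem.List.pyGetD days i "") ∘ fun j : Nat => (j : Int))
        = fun j : Nat => days.getD j "" from funext fun j => hpg j]
  rw [show ((fun i => !(PySem.Set.contains (st.toList.foldl (fun s ch =>
          match (pvIndex days).get? ch with
          | some t => PySem.Set.union s t
          | none => s) PySem.Set.empty) i)) ∘ fun j : Nat => (j : Int))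
        = fun j : Nat => pvBooLoop st.toList (days.getD j "") from ?_]
  · exact (pvFilter_range days "" (fun x => pvBooLoop st.toList x)).symm
  · funext j
    simp only [Function.comp_def]
    rw [pvBooLoop_eq]
    congr 1
    rw [Bool.eq_iff_iff]
    simp only [PySem.Set.contains_iff, List.any_eq_true, List.contains_iff_mem]
    rw [pvMem_forbidden]
    constructor
    · rintro (h | ⟨ch, hch, t, hg, hm⟩)
      · simp [PySem.Set.empty] at h
      · have hmem := (pvGetD_some _ ch (j : Int)).mp ⟨t, hg, hm⟩
        obtain ⟨k, hk, hjk, hc⟩ := (pvMem_pvIndex days ch (j : Int)).mp hmem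
        have hj : j = k := by exact_mod_cast hjk
        subst hj
        exact ⟨ch, hch, by simpa [List.getD, List.getElem?_eq_getElem hk] using hc⟩
    · rintro ⟨ch, hch, hc⟩
      by_cases hk : j < days.length
      · right
        have hmem : ((j : Nat) : Int) ∈ (pvIndex days).getD ch PySem.Set.empty :=
          (pvMem_pvIndex days ch (j : Int)).mpr
            ⟨j, hk, rfl, by simpa [List.getD, List.getElem?_eq_getElem hk] using hc⟩
        obtain ⟨t, hg, hm⟩ := (pvGetD_some _ ch (j : Int)).mpr hmem
        exact ⟨ch, hch, t, hg, hm⟩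
      · exfalso
        have hnil : days.getD j "" = "" := by
          simp [List.getD, List.getElem?_eq_none (Nat.le_of_not_lt hk)]
        rw [hnil] at hc
        simp at hc

-- ===== VERDICT (by name: the statement is the Claim_ definition above) =====
theorem genDayByDay_spec : Claim_equal_genDayByDay := by
  intro days off _
  unfold Spec_genDayByDay
  exact genDayByDay_eq days off
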